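-- pv_equiv track=rewrite | github.com/ISMAKOVA/SEMESTR_6 | Artificial intelligence systems & technologies/lab_5-6/STII_lab4.2.py | removeDubl
-- ===== SOURCE A (Python) =====
-- def removeDubl(nodes):
--     forDel = []
--     for nodeSr in nodes:
--         for ao in nodes:
--             if ao['nodeStr'] in nodeSr['nodeStr'] and ao != nodeSr and 'absolute' not in ao.keys():
--                 forDel.append(ao)
--     for dele in forDel:
--         try:
--             nodes.remove(dele)
--         except:
--             nothing = True
--     return nodes
-- ===== SOURCE B (Python) =====
-- def removeDubl(nodes):
--     # Single filtering pass (mutates `nodes` in place like the original's remove calls).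
--     def deletable(x):
--         return 'absolute' not in x and any(x['nodeStr'] in y['nodeStr'] and y != x for y in nodes)
--     kept = [x for x in nodes if not deletable(x)]
--     nodes[:] = kept
--     return nodes
-- ===== Notes on version B (the rewrite author's own statement) =====
-- stated objective: simpler
-- what changed: Replaces the two-phase design (accumulate a forDel list with duplicate appends, then repeatedly nodes.remove with exception swallowing) by a single filtering pass that rebuilds the list in place from a per-node deletable predicate.
import Mathlib
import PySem

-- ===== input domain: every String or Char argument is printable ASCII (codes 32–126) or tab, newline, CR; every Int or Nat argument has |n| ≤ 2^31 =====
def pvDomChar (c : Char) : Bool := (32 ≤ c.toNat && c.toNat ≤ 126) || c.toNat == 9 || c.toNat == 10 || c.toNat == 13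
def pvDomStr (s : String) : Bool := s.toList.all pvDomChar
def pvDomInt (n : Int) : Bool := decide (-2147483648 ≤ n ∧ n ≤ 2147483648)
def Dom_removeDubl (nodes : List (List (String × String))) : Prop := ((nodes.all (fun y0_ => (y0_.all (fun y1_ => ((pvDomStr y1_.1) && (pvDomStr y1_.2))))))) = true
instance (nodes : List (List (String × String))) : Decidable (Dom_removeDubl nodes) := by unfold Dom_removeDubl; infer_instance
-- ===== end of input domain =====

-- B replaces A's build-forDel-then-repeated-remove design by one filtering pass (B mutates the
-- argument list in place with nodes[:] = …, matching A's in-place removal; the theorems below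
-- are about the returned value).

-- Shared dict primitives (a node is a Python dict, modelled as an association list):
-- first-match lookup, key test, and Python's order-insensitive dict equality (==).
def dGet? (d : List (String × String)) (k : String) : Option String :=
  match d with
  | [] => none
  | p :: t => if p.1 = k then some p.2 else dGet? t k

def dGet (d : List (String × String)) (k : String) : String := (dGet? d k).getD ""

def dHasKey (d : List (String × String)) (k : String) : Bool := (dGet? d k).isSome

def dictEq (a b : List (String × String)) : Bool :=
  (a.all fun p => dGet? b p.1 == some p.2) && (b.all fun p => dGet? a p.1 == some p.2)

-- ===== PORT A =====
-- nodes.remove(dele) wrapped in try/except: remove the first ==-equal element, no-op if absent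
def removeFirst (ns : List (List (String × String))) (v : List (String × String)) :
    List (List (String × String)) :=
  match ns with
  | [] => []
  | x :: t => if dictEq x v then t else x :: removeFirst t v

def removeDubl (nodes : List (List (String × String))) : List (List (String × String)) :=
  let forDel := nodes.foldl (fun acc nodeSr =>
    nodes.foldl (fun acc ao =>
      if PySem.Str.isIn (dGet ao "nodeStr") (dGet nodeSr "nodeStr") && !dictEq ao nodeSr
          && !dHasKey ao "absolute"
      then acc ++ [ao] else acc) acc) []
  forDel.foldl (fun ns dele => removeFirst ns dele) nodes

-- ===== PORT B =====
def pvDeletable (nodes : List (List (String × String))) (x : List (String × String)) : Bool :=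
  !dHasKey x "absolute" &&
    nodes.any fun y => PySem.Str.isIn (dGet x "nodeStr") (dGet y "nodeStr") && !dictEq y x

def removeDubl_alt (nodes : List (List (String × String))) : List (List (String × String)) :=
  nodes.filter fun x => !pvDeletable nodes x

-- ===== PRECONDITION & SPEC =====
-- Pre_ excludes (a) nodes without a 'nodeStr' key, on which the Python A raises KeyError, and
-- (b) association lists with a duplicated key inside one node, which do not represent a Python
-- dict at all (the dict → association-list convention never produces one; fed literally as a
-- list of pairs, A raises TypeError on its first subscript).
def Pre_removeDubl (nodes : List (List (String × String))) : Prop :=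
  (∀ d ∈ nodes, "nodeStr" ∈ d.map Prod.fst) ∧ (∀ d ∈ nodes, (d.map Prod.fst).Nodup)

instance (nodes : List (List (String × String))) : Decidable (Pre_removeDubl nodes) := by
  unfold Pre_removeDubl; infer_instance

def pvWitness_removeDubl : (List (List (String × String))) :=
  [[("nodeStr", "ab"), ("x", "1")], [("nodeStr", "a")], [("nodeStr", "c"), ("absolute", "1")]]

def Spec_removeDubl (nodes : List (List (String × String))) (out : List (List (String × String))) : Prop := out = removeDubl_alt nodes
instance (nodes : List (List (String × String))) (out : List (List (String × String))) : Decidable (Spec_removeDubl nodes out) := by unfold Spec_removeDubl; infer_instance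

-- ===== CLAIM (what is proved, stated in full; the proofs are below) =====
def Claim_equal_removeDubl : Prop := ∀ (nodes : List (List (String × String))), Dom_removeDubl nodes → Pre_removeDubl nodes → Spec_removeDubl nodes (removeDubl nodes)

-- ===== LEMMAS AND PROOFS =====

theorem dGet?_some_mem {d : List (String × String)} {k v : String}
    (h : dGet? d k = some v) : (k, v) ∈ d := by
  induction d with
  | nil => simp [dGet?] at h
  | cons p t ih =>
    by_cases hk : p.1 = k
    · simp [dGet?, hk] at h
      have : (k, v) = p := by cases p; simp_all
      rw [this]; exact List.mem_cons_self
    · simp [dGet?, hk] at h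
      exact List.mem_cons_of_mem _ (ih h)

theorem dictEq_iff {a b : List (String × String)} :
    dictEq a b = true ↔
      (∀ p ∈ a, dGet? b p.1 = some p.2) ∧ (∀ p ∈ b, dGet? a p.1 = some p.2) := by
  simp [dictEq, List.all_eq_true]

theorem dictEq_symm (a b : List (String × String)) : dictEq a b = dictEq b a := by
  simp [dictEq, Bool.and_comm]

theorem dictEq_trans {a b c : List (String × String)}
    (hab : dictEq a b = true) (hbc : dictEq b c = true) : dictEq a c = true := by
  rw [dictEq_iff] at hab hbc ⊢
  constructor
  · intro p hp
    exact hbc.1 _ (dGet?_some_mem (hab.1 p hp))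
  · intro p hp
    exact hab.2 _ (dGet?_some_mem (hbc.2 p hp))

theorem dictEq_lookup {a b : List (String × String)} (h : dictEq a b = true) (k : String) :
    dGet? a k = dGet? b k := by
  rw [dictEq_iff] at h
  cases ha : dGet? a k with
  | some v => exact (h.1 _ (dGet?_some_mem ha)).symm
  | none =>
    cases hb : dGet? b k with
    | some w =>
      have hw := h.2 _ (dGet?_some_mem hb)
      rw [ha] at hw
      exact absurd hw (by simp)
    | none => rfl

theorem lookup_self {d : List (String × String)} (hnd : (d.map Prod.fst).Nodup) :
    ∀ p ∈ d, dGet? d p.1 = some p.2 := by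
  induction d with
  | nil => simp
  | cons q t ih =>
    simp only [List.map_cons, List.nodup_cons] at hnd
    intro p hp
    rcases List.mem_cons.mp hp with h | h
    · subst h; simp [dGet?]
    · have hne : ¬ q.1 = p.1 := by
        intro he
        exact hnd.1 (he ▸ List.mem_map_of_mem h)
      simp only [dGet?]
      rw [if_neg hne]
      exact ih hnd.2 p h

theorem dictEq_refl {d : List (String × String)} (hnd : (d.map Prod.fst).Nodup) :
    dictEq d d = true := by
  rw [dictEq_iff]
  exact ⟨lookup_self hnd, lookup_self hnd⟩

theorem dictEq_congr_right {x y : List (String × String)} (h : dictEq x y = true)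
    (z : List (String × String)) : dictEq z x = dictEq z y := by
  by_cases hzx : dictEq z x = true
  · rw [hzx, dictEq_trans hzx h]
  · by_cases hzy : dictEq z y = true
    · exact absurd (dictEq_trans hzy (dictEq_symm x y ▸ h)) hzx
    · rw [Bool.eq_false_iff.mpr hzx, Bool.eq_false_iff.mpr hzy]

theorem pvDeletable_congr {nodes : List (List (String × String))}
    {x y : List (String × String)} (h : dictEq x y = true) :
    pvDeletable nodes x = pvDeletable nodes y := by
  unfold pvDeletable
  have hk : dHasKey x "absolute" = dHasKey y "absolute" := by
    unfold dHasKey; rw [dictEq_lookup h]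
  have hg : dGet x "nodeStr" = dGet y "nodeStr" := by
    unfold dGet; rw [dictEq_lookup h]
  rw [hk, hg]
  congr 1
  refine List.any_congr rfl fun z => ?_
  rw [dictEq_congr_right h z]

-- removeFirst facts
theorem mem_removeFirst {ns : List (List (String × String))} {d x : List (String × String)}
    (h : x ∈ removeFirst ns d) : x ∈ ns := by
  induction ns with
  | nil => simp [removeFirst] at h
  | cons a t ih =>
    by_cases ha : dictEq a d = true
    · simp [removeFirst, ha] at h
      exact List.mem_cons_of_mem _ h
    · simp only [removeFirst, if_neg (by simp [ha] : ¬ dictEq a d = true)] at h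
      rcases List.mem_cons.mp h with h | h
      · exact h ▸ List.mem_cons_self
      · exact List.mem_cons_of_mem _ (ih h)

theorem removeFirst_no_match {ns : List (List (String × String))} {d : List (String × String)}
    (h : ∀ y ∈ ns, dictEq y d = false) : removeFirst ns d = ns := by
  induction ns with
  | nil => rfl
  | cons a t ih =>
    have ha := h a List.mem_cons_self
    simp only [removeFirst, ha, Bool.false_eq_true, if_false]
    rw [ih fun y hy => h y (List.mem_cons_of_mem _ hy)]

theorem removeFirst_filter {del : List (String × String) → Bool}
    {ns : List (List (String × String))} {d : List (String × String)}
    (h : ∀ y, dictEq y d = true → del y = true) :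
    (removeFirst ns d).filter (fun x => !del x) = ns.filter (fun x => !del x) := by
  induction ns with
  | nil => rfl
  | cons a t ih =>
    by_cases ha : dictEq a d = true
    · simp [removeFirst, ha, h a ha]
    · simp only [removeFirst, if_neg (by simp [ha] : ¬ dictEq a d = true)]
      simp only [List.filter_cons, ih]

theorem removeFirst_countP {ns : List (List (String × String))} {d : List (String × String)}
    (hm : ∃ y ∈ ns, dictEq y d = true) (x : List (String × String)) :
    (removeFirst ns d).countP (fun a => dictEq a x) + (if dictEq d x then 1 else 0) =
      ns.countP (fun a => dictEq a x) := by
  induction ns with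
  | nil => simp at hm
  | cons a t ih =>
    by_cases ha : dictEq a d = true
    · have hax : dictEq a x = dictEq d x := by
        by_cases hdx : dictEq d x = true
        · rw [hdx, dictEq_trans ha hdx]
        · by_cases haxb : dictEq a x = true
          · exact absurd (dictEq_trans (dictEq_symm a d ▸ ha) haxb) hdx
          · rw [Bool.eq_false_iff.mpr haxb, Bool.eq_false_iff.mpr hdx]
      simp only [removeFirst, ha, if_true, List.countP_cons, hax]
    · rcases hm with ⟨y, hy, hyd⟩
      rcases List.mem_cons.mp hy with h | h
      · exact absurd (h ▸ hyd) ha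
      · have hrec := ih ⟨y, h, hyd⟩
        simp only [removeFirst, if_neg (by simp [ha] : ¬ dictEq a d = true), List.countP_cons]
        omega

-- main loop lemma: repeated first-match removal realises the filter
theorem foldl_rm_eq_filter (del : List (String × String) → Bool)
    (hcong : ∀ x y, dictEq x y = true → del x = del y) :
    ∀ (dels ns : List (List (String × String))),
      (∀ d ∈ dels, del d = true) →
      (∀ x ∈ ns, dictEq x x = true) →
      (∀ x ∈ ns, del x = true →
        ns.countP (fun a => dictEq a x) ≤ dels.countP (fun a => dictEq a x)) →
      dels.foldl (fun ns dele => removeFirst ns dele) ns = ns.filter (fun x => !del x) := by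
  intro dels
  induction dels with
  | nil =>
    intro ns _ hrefl hcnt
    simp only [List.foldl_nil]
    symm
    apply List.filter_eq_self.mpr
    intro x hx
    by_cases hdx : del x = true
    · have h1 : 0 < ns.countP (fun a => dictEq a x) :=
        List.countP_pos_iff.mpr ⟨x, hx, hrefl x hx⟩
      have h2 := hcnt x hx hdx
      simp only [List.countP_nil] at h2
      omega
    · simp [Bool.eq_false_iff.mpr hdx]
  | cons d dels ih =>
    intro ns hdel hrefl hcnt
    simp only [List.foldl_cons]
    by_cases hm : ∃ y ∈ ns, dictEq y d = true
    · have hrm : ∀ y, dictEq y d = true → del y = true := fun y hy => by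
        rw [hcong y d hy]; exact hdel d List.mem_cons_self
      rw [ih (removeFirst ns d)
          (fun e he => hdel e (List.mem_cons_of_mem _ he))
          (fun x hx => hrefl x (mem_removeFirst hx))
          ?_]
      · exact removeFirst_filter hrm
      · intro x hx hdx
        have hxns := mem_removeFirst hx
        have h1 := removeFirst_countP hm x
        have h2 := hcnt x hxns hdx
        rw [List.countP_cons] at h2
        omega
    · simp only [not_exists, not_and] at hm
      rw [removeFirst_no_match fun y hy => Bool.eq_false_iff.mpr (hm y hy)]
      apply ih ns (fun e he => hdel e (List.mem_cons_of_mem _ he)) hrefl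
      intro x hx hdx
      have h2 := hcnt x hx hdx
      rw [List.countP_cons] at h2
      have hdxm : dictEq d x = false := by
        by_cases h' : dictEq d x = true
        · exact absurd (dictEq_symm x d ▸ h') (hm x hx)
        · exact Bool.eq_false_iff.mpr h'
      rw [hdxm] at h2
      simpa using h2

theorem countP_le_countP_flatMap {p : List (String × String) → Bool}
    {f : List (String × String) → List (List (String × String))}
    {y : List (String × String)} {l : List (List (String × String))} (hy : y ∈ l) :
    (f y).countP p ≤ (l.flatMap f).countP p := by
  obtain ⟨l1, l2, h⟩ := List.append_of_mem hy
  subst h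
  simp only [List.flatMap_append, List.flatMap_cons, List.countP_append]
  omega

-- A's forDel loop, rewritten as a flatMap of filters
theorem forDel_eq (nodes : List (List (String × String))) :
    nodes.foldl (fun acc nodeSr =>
      nodes.foldl (fun acc ao =>
        if PySem.Str.isIn (dGet ao "nodeStr") (dGet nodeSr "nodeStr") && !dictEq ao nodeSr
            && !dHasKey ao "absolute"
        then acc ++ [ao] else acc) acc) [] =
    nodes.flatMap (fun nodeSr => nodes.filter (fun ao =>
      PySem.Str.isIn (dGet ao "nodeStr") (dGet nodeSr "nodeStr") && !dictEq ao nodeSr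
        && !dHasKey ao "absolute")) := by
  rw [List.foldl_ext _ (fun acc nodeSr => acc ++ nodes.filter (fun ao =>
      PySem.Str.isIn (dGet ao "nodeStr") (dGet nodeSr "nodeStr") && !dictEq ao nodeSr
        && !dHasKey ao "absolute")) []
    (fun acc s _ => PySem.List.foldl_append_if_eq_filter _ nodes acc)]
  rw [PySem.List.foldl_append_eq_flatMap]
  simp

theorem removeDubl_spec_aux (nodes : List (List (String × String)))
    (hpre : Pre_removeDubl nodes) : removeDubl nodes = removeDubl_alt nodes := by
  obtain ⟨-, hnd⟩ := hpre
  unfold removeDubl removeDubl_alt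
  rw [forDel_eq]
  apply foldl_rm_eq_filter (pvDeletable nodes) (fun x y h => pvDeletable_congr h)
  · -- every element of forDel is deletable
    intro d hd
    rw [List.mem_flatMap] at hd
    obtain ⟨s, hs, hdf⟩ := hd
    rw [List.mem_filter] at hdf
    obtain ⟨-, hcond⟩ := hdf
    simp only [Bool.and_eq_true, Bool.not_eq_eq_eq_not, Bool.not_true] at hcond
    unfold pvDeletable
    simp only [Bool.and_eq_true, List.any_eq_true]
    refine ⟨by simp [hcond.2], s, hs, ?_⟩
    exact ⟨hcond.1.1, by simp [dictEq_symm s d, hcond.1.2]⟩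
  · -- reflexivity on the nodes (distinct keys)
    intro x hx
    exact dictEq_refl (hnd x hx)
  · -- enough marks: forDel contains every ==-copy of a deletable node
    intro x hx hdx
    unfold pvDeletable at hdx
    simp only [Bool.and_eq_true, List.any_eq_true] at hdx
    obtain ⟨habs, y, hy, hcy⟩ := hdx
    rw [Bool.not_eq_true'] at habs
    obtain ⟨hisin, hnyx⟩ := hcy
    rw [Bool.not_eq_true'] at hnyx
    have hkeep : ∀ a ∈ nodes, (dictEq a x = true ↔
        (dictEq a x && (PySem.Str.isIn (dGet a "nodeStr") (dGet y "nodeStr") && !dictEq a y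
          && !dHasKey a "absolute")) = true) := by
      intro a _
      constructor
      · intro hax
        have hg : dGet a "nodeStr" = dGet x "nodeStr" := by
          unfold dGet; rw [dictEq_lookup hax]
        have hay : dictEq a y = false := by
          by_cases h' : dictEq a y = true
          · have hxy : dictEq x y = true := dictEq_trans (dictEq_symm a x ▸ hax) h'
            exact absurd (dictEq_symm x y ▸ hxy : dictEq y x = true) (by simp [hnyx])
          · exact Bool.eq_false_iff.mpr h'
        have hab : dHasKey a "absolute" = false := by
          unfold dHasKey at habs ⊢
          rw [dictEq_lookup hax]
          exact habs
        simp only [hax, hg, hisin, hay, hab]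
        rfl
      · intro hconj
        simp only [Bool.and_eq_true] at hconj
        exact hconj.1
    calc nodes.countP (fun a => dictEq a x)
        = nodes.countP (fun a => dictEq a x &&
            (PySem.Str.isIn (dGet a "nodeStr") (dGet y "nodeStr") && !dictEq a y
              && !dHasKey a "absolute")) := List.countP_congr hkeep
      _ = (nodes.filter (fun a => PySem.Str.isIn (dGet a "nodeStr") (dGet y "nodeStr")
            && !dictEq a y && !dHasKey a "absolute")).countP (fun a => dictEq a x) := by
          rw [List.countP_filter]
      _ ≤ (nodes.flatMap (fun s => nodes.filter (fun ao =>
            PySem.Str.isIn (dGet ao "nodeStr") (dGet s "nodeStr") && !dictEq ao s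
              && !dHasKey ao "absolute"))).countP (fun a => dictEq a x) :=
          countP_le_countP_flatMap (f := fun s => nodes.filter (fun ao =>
            PySem.Str.isIn (dGet ao "nodeStr") (dGet s "nodeStr") && !dictEq ao s
              && !dHasKey ao "absolute")) hy

-- ===== VERDICT (by name: the statement is the Claim_ definition above) =====
theorem removeDubl_spec : Claim_equal_removeDubl := by
  intro nodes _ hpre
  unfold Spec_removeDubl
  exact removeDubl_spec_aux nodes hpre
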